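-- pv_equiv track=rewrite | github.com/saspav/lct2024-task16 | data_process.py | transform_text_labels
-- ===== SOURCE A (Python) =====
-- def transform_text_labels(text, labels):
--     """
--     Формирование списка меток для каждого слова в тексте.
--     :param text: текст со словами, разделенными пробелами
--     :param labels: список со словарями меток и их позициями
--     :return: список меток для каждого слова в тексте
--     """
--     # если метки - это словарь, засунем его в список
--     if isinstance(labels, dict):
--         labels = [labels]
--     len_words = len(text.split())
--     idx_labels = ['O'] * len_words
--     for label_dict in labels:
--         for key, values in label_dict.items():
--             for value in values:
--                 if value < len_words:
--                     idx_labels[value] = key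
--     return idx_labels
-- ===== SOURCE B (Python) =====
-- def transform_text_labels(text, labels):
--     """Flatten all (position, key) writes once, then answer each word index
--     by a last-match search over that write log."""
--     if isinstance(labels, dict):
--         labels = [labels]
--     len_words = len(text.split())
--     writes = [(v, k) for d in labels for k, vs in d.items() for v in vs]
--     return [next((k for v, k in reversed(writes) if v == i), 'O')
--             for i in range(len_words)]
-- ===== Notes on version B (the rewrite author's own statement) =====
-- stated objective: alternative
-- what changed: Instead of preallocating an 'O' list and scatter-writing labels into it, B flattens all (position, key) pairs into one write log and answers each word index independently by a last-match search over that log (first match over the reversed log).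
-- intended difference: On inputs containing a negative position v with -len_words <= v < 0, A's idx_labels[value]=key wraps around and labels the word at len_words+v, while B finds no matching word index and leaves 'O'; positions are word indices, so B's value is the intended one. — e.g. on transform_text_labels("a b", [[("X", [-1])]]): A returns ["O", "X"], B returns ["O", "O"]
import Mathlib
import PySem

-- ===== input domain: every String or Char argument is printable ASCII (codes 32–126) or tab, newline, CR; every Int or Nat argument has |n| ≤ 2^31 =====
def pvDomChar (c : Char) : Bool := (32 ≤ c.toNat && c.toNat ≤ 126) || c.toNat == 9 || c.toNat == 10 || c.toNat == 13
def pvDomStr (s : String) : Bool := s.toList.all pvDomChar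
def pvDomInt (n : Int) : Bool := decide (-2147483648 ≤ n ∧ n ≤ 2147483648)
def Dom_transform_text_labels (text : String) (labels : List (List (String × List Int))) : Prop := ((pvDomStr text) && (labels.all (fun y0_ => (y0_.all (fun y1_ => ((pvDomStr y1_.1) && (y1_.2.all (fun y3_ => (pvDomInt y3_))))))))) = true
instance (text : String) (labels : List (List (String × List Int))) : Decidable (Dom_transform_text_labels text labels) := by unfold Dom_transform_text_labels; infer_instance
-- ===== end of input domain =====

-- B flattens all (position, key) writes into one log and answers each word index by a
-- last-match search over the log, instead of A's scatter-writes into a preallocated list.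
-- Return value only; neither side mutates its arguments.

-- ===== PORT A =====
def transform_text_labels (text : String) (labels : List (List (String × List Int))) : List String :=
  let len_words := (PySem.Str.split₀ text).length
  labels.foldl
    (fun idx_labels label_dict =>
      label_dict.foldl
        (fun idx_labels kv =>
          kv.2.foldl
            (fun idx_labels value =>
              if value < (len_words : Int) then PySem.List.pySetD idx_labels value kv.1
              else idx_labels)
            idx_labels)
        idx_labels)
    (List.replicate len_words "O")

-- ===== PORT B =====
-- 'reversed(writes)' with first-match 'next(…, 'O')' is ported as List.find? on writes.reverse.
def transform_text_labels_alt (text : String) (labels : List (List (String × List Int))) : List String :=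
  let len_words := (PySem.Str.split₀ text).length
  let writes : List (Int × String) :=
    labels.flatMap (fun d => d.flatMap (fun kv => kv.2.map (fun v => (v, kv.1))))
  (PySem.List.pyRange 0 (len_words : Int) 1).map (fun i =>
    ((writes.reverse.find? (fun vk => vk.1 == i)).map Prod.snd).getD "O")

-- ===== PRECONDITION & SPEC =====
-- Pre_ excludes exactly the inputs where A raises IndexError: a position below -len_words.
def Pre_transform_text_labels (text : String) (labels : List (List (String × List Int))) : Prop :=
  ∀ ld ∈ labels, ∀ kv ∈ ld, ∀ v ∈ kv.2, -((PySem.Str.split₀ text).length : Int) ≤ v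
instance (text : String) (labels : List (List (String × List Int))) : Decidable (Pre_transform_text_labels text labels) := by unfold Pre_transform_text_labels; infer_instance
def pvWitness_transform_text_labels : String × (List (List (String × List Int))) := ("x y z", [[("B-ORG", [0, 2])], [("I-ORG", [1, 5])]])

-- On inputs with a negative position v with -len_words ≤ v < 0, A's idx_labels[value]=key wraps and labels the word at
-- len_words+v, while B finds no matching word index and leaves 'O'; positions are word indices, so B's value is the intended one.
def D_transform_text_labels (text : String) (labels : List (List (String × List Int))) : Prop :=
  ∃ ld ∈ labels, ∃ kv ∈ ld, ∃ v ∈ kv.2, v < 0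
instance (text : String) (labels : List (List (String × List Int))) : Decidable (D_transform_text_labels text labels) := by unfold D_transform_text_labels; infer_instance

def Spec_transform_text_labels (text : String) (labels : List (List (String × List Int))) (out : List String) : Prop := ¬ D_transform_text_labels text labels → out = transform_text_labels_alt text labels
instance (text : String) (labels : List (List (String × List Int))) (out : List String) : Decidable (Spec_transform_text_labels text labels out) := by unfold Spec_transform_text_labels; infer_instance

def pvDiffWitness_transform_text_labels : String × (List (List (String × List Int))) := ("a b", [[("X", [-1])]])
def pvDiffWitnessOut_transform_text_labels : (List String) × (List String) := (["O", "X"], ["O", "O"])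

-- ===== CLAIM (what is proved, stated in full; the proofs are below) =====
def Claim_unchanged_transform_text_labels : Prop := ∀ (text : String) (labels : List (List (String × List Int))), Dom_transform_text_labels text labels → Pre_transform_text_labels text labels → Spec_transform_text_labels text labels (transform_text_labels text labels)
def Claim_changed_transform_text_labels : Prop := Dom_transform_text_labels (pvDiffWitness_transform_text_labels.1) (pvDiffWitness_transform_text_labels.2) ∧ Pre_transform_text_labels (pvDiffWitness_transform_text_labels.1) (pvDiffWitness_transform_text_labels.2) ∧ D_transform_text_labels (pvDiffWitness_transform_text_labels.1) (pvDiffWitness_transform_text_labels.2) ∧ transform_text_labels (pvDiffWitness_transform_text_labels.1) (pvDiffWitness_transform_text_labels.2) = pvDiffWitnessOut_transform_text_labels.1 ∧ transform_text_labels_alt (pvDiffWitness_transform_text_labels.1) (pvDiffWitness_transform_text_labels.2) = pvDiffWitnessOut_transform_text_labels.2 ∧ pvDiffWitnessOut_transform_text_labels.1 ≠ pvDiffWitnessOut_transform_text_labels.2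

-- ===== LEMMAS AND PROOFS =====

-- A's write step, viewed through the flattened write log
def pvStep (n : Nat) (a : List String) (w : Int × String) : List String :=
  if w.1 < (n : Int) then PySem.List.pySetD a w.1 w.2 else a

-- A's triple-nested fold over labels equals the single fold of pvStep over the flattened log
lemma foldl_flatten (n : Nat) (labels : List (List (String × List Int))) (a : List String) :
    labels.foldl
      (fun idx_labels label_dict =>
        label_dict.foldl
          (fun idx_labels kv =>
            kv.2.foldl
              (fun idx_labels value =>
                if value < (n : Int) then PySem.List.pySetD idx_labels value kv.1
                else idx_labels)
              idx_labels)
          idx_labels)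
      a
    = (labels.flatMap (fun d => d.flatMap (fun kv => kv.2.map (fun v => (v, kv.1))))).foldl (pvStep n) a := by
  induction labels generalizing a with
  | nil => rfl
  | cons ld labels ih =>
    simp only [List.foldl_cons, List.flatMap_cons, List.foldl_append, ih]
    congr 1
    induction ld generalizing a with
    | nil => rfl
    | cons kv ld ih2 =>
      simp only [List.foldl_cons, List.flatMap_cons, List.foldl_append, ih2]
      congr 1
      induction kv.2 generalizing a with
      | nil => rfl
      | cons v vs ih3 =>
        simp only [List.foldl_cons, List.map_cons, pvStep, ih3]

-- one write on an array rendered as a map over range n (nonnegative position)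
lemma step_render (n : Nat) (g : Nat → String) (w : Int × String) (hw : 0 ≤ w.1) :
    pvStep n ((List.range n).map g) w
    = (List.range n).map (fun (i : Nat) => if w.1 = (i : Int) then w.2 else g i) := by
  unfold pvStep
  by_cases h : w.1 < (n : Int)
  · rw [if_pos h, PySem.List.pySetD_of_nonneg _ _ hw]
    apply List.ext_getElem
    · simp
    · intro i h1 h2
      simp only [List.getElem_set, List.getElem_map, List.getElem_range]
      have hlen : i < n := by simpa using h2
      have : (w.1.toNat = i) ↔ (w.1 = (i : Int)) := by omega
      by_cases hc : w.1.toNat = i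
      · simp [this.mp hc]
      · rw [if_neg hc, if_neg (fun hh => hc (this.mpr hh))]
  · rw [if_neg h]
    apply List.ext_getElem
    · simp
    · intro i h1 h2
      have hlen : i < n := by simpa using h1
      have : ¬ (w.1 = (i : Int)) := by omega
      simp [this]

-- folding the write log over a rendered array = rendering the last-match lookup over the reversed log
lemma foldl_writes (n : Nat) (ws : List (Int × String)) (g : Nat → String)
    (h : ∀ w ∈ ws, 0 ≤ w.1) :
    ws.foldl (pvStep n) ((List.range n).map g)
    = (List.range n).map (fun (i : Nat) =>
        ((ws.reverse.find? (fun vk => vk.1 == (i : Int))).map Prod.snd).getD (g i)) := by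
  induction ws generalizing g with
  | nil => simp
  | cons w ws ih =>
    simp only [List.foldl_cons, List.reverse_cons]
    rw [step_render n g w (h w (by simp)),
        ih _ (fun w' hw' => h w' (by simp [hw']))]
    apply List.map_congr_left
    intro i _
    rw [List.find?_append]
    cases hf : ws.reverse.find? (fun vk => vk.1 == (i : Int)) with
    | some p => simp [Option.or]
    | none =>
      simp only [Option.or, List.find?]
      by_cases hc : w.1 = (i : Int)
      · simp [hc]
      · have hb : (w.1 == (i : Int)) = false := by simpa using hc
        simp [hb, hc]

-- ===== VERDICT (by name: the statement is the Claim_ definition above) =====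
theorem transform_text_labels_spec : Claim_unchanged_transform_text_labels := by
  intro text labels _hDom _hPre hD
  simp only [transform_text_labels, transform_text_labels_alt]
  set n := (PySem.Str.split₀ text).length with hn
  have hpos : ∀ w ∈ labels.flatMap (fun d => d.flatMap (fun kv => kv.2.map (fun v => (v, kv.1)))), (0:Int) ≤ w.1 := by
    intro w hw
    simp only [List.mem_flatMap, List.mem_map] at hw
    obtain ⟨ld, hld, kv, hkv, v, hv, rfl⟩ := hw
    by_contra hneg
    exact hD ⟨ld, hld, kv, hkv, v, hv, by omega⟩
  have hinit : List.replicate n "O" = (List.range n).map (fun _ => "O") := by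
    simp [List.map_const']
  rw [hinit, foldl_flatten n labels, foldl_writes n _ _ hpos]
  rw [PySem.List.pyRange_zero_natCast, List.map_map]
  rfl

theorem transform_text_labels_changed : Claim_changed_transform_text_labels := by
  unfold Claim_changed_transform_text_labels; decide
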